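-- pv_equiv track=rewrite | github.com/QuentinHerszko/repository-test | Ampoule.py | amp
-- ===== SOURCE A (Python) =====
-- def amp(n):
--   l=[1]
--   for i in range(1,n):
--     l.append(0)
--   for k in range(1,n):
--     m=l[:]
--     for j in range(0,n-1):
--       if m[j]==1:
--         if l[j+1]==1:
--           l[j+1]=0
--         else:
--           l[j+1]=1
--   return sum(l)
-- ===== SOURCE B (Python) =====
-- def amp(n):
--     # Closed form: after the simulation the array holds row n-1 of Pascal's
--     # triangle mod 2, whose sum is 2^(popcount of n-1); n <= 0 leaves the
--     # single initial 1 untouched.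
--     return 1 if n <= 0 else 2 ** (n - 1).bit_count()
-- ===== Notes on version B (the rewrite author's own statement) =====
-- stated objective: faster
-- what changed: Replaced the O(n^2) cellular simulation of XOR-toggles (Pascal's triangle mod 2) by the closed form 2^popcount(n-1) from Lucas' theorem.
import Mathlib
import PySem

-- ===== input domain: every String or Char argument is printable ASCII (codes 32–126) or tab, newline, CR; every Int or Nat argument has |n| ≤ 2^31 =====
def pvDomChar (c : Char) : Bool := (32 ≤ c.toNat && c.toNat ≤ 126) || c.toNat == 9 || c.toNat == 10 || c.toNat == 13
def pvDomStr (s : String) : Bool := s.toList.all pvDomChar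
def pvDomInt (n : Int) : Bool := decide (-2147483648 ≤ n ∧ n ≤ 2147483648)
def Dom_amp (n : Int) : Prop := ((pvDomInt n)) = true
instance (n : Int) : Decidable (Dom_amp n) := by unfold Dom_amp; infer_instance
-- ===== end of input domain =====

-- B replaces A's quadratic toggle simulation by the closed form 2^popcount(n-1) (Lucas' theorem).

-- ===== PORT A =====
-- literal port of Source A: build [1,0,...,0] (length n), run n-1 sweeps that toggle l[j+1]
-- whenever the snapshot m (= l[:]) has m[j] == 1, then sum. Every index reached is in
-- range, so pyGetD/pySetD are exact here (Python never raises).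
def amp (n : Int) : Int :=
  let l0 : List Int := (PySem.List.pyRange 1 n 1).foldl (fun l _i => l ++ [0]) [1]
  let l1 : List Int := (PySem.List.pyRange 1 n 1).foldl (fun l _k =>
    let m := l   -- m = l[:]
    (PySem.List.pyRange 0 (n - 1) 1).foldl (fun l j =>
      if PySem.List.pyGetD m j 0 == 1 then
        (if PySem.List.pyGetD l (j + 1) 0 == 1 then PySem.List.pySetD l (j + 1) 0
         else PySem.List.pySetD l (j + 1) 1)
      else l) l) l0
  l1.sum

-- ===== PORT B =====
-- popcount n = Python's (n).bit_count() for nonnegative n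
def popcount : Nat → Nat
  | 0 => 0
  | n + 1 => (n + 1) % 2 + popcount ((n + 1) / 2)
decreasing_by exact Nat.div_lt_self (Nat.succ_pos n) one_lt_two

def amp_alt (n : Int) : Int :=
  if n ≤ 0 then 1 else (2 : Int) ^ popcount (n - 1).toNat

-- ===== PRECONDITION & SPEC =====
def Spec_amp (n : Int) (out : Int) : Prop := out = amp_alt n
instance (n : Int) (out : Int) : Decidable (Spec_amp n out) := by unfold Spec_amp; infer_instance

-- ===== CLAIM (what is proved, stated in full; the proofs are below) =====
def Claim_equal_amp : Prop := ∀ (n : Int), Dom_amp n → Spec_amp n (amp n)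

-- ===== LEMMAS AND PROOFS =====

-- pvRow k N = Pascal's triangle row k mod 2, truncated/padded to length N
def pvG (k j : Nat) : Int := ((Nat.choose k j % 2 : Nat) : Int)
def pvRow (k N : Nat) : List Int := (List.range N).map (pvG k)

-- the inner-loop body of A, with Nat index (m = the snapshot)
def pvUpd (m l : List Int) (j : Nat) : List Int :=
  if m.getD j 0 == 1 then
    (if l.getD (j + 1) 0 == 1 then l.set (j + 1) 0 else l.set (j + 1) 1)
  else l

lemma amp_init (L : List Int) (init : List Int) :
    L.foldl (fun l (_ : Int) => l ++ [0]) init = init ++ List.replicate L.length 0 := by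
  induction L generalizing init with
  | nil => simp
  | cons x xs ih =>
      simp only [List.foldl_cons, ih, List.length_cons, List.replicate_succ']
      rw [List.append_assoc]
      congr 1
      rw [List.singleton_append, ← List.replicate_succ, List.replicate_succ']

lemma pvRow_zero (N : Nat) (hN : 1 ≤ N) :
    pvRow 0 N = [1] ++ List.replicate (N - 1) 0 := by
  obtain ⟨M, rfl⟩ : ∃ M, N = M + 1 := ⟨N - 1, by omega⟩
  simp only [pvRow, List.range_succ_eq_map, List.map_cons, List.map_map]
  have h0 : pvG 0 0 = 1 := by simp [pvG]
  have h1 : (List.range M).map (pvG 0 ∘ Nat.succ) = List.replicate M 0 := by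
    rw [List.eq_replicate_iff]
    constructor
    · simp
    · intro b hb
      obtain ⟨j, _, rfl⟩ := List.mem_map.mp hb
      simp [pvG, Nat.choose_eq_zero_of_lt (by omega : (0:Nat) < j.succ)]
  rw [h0, h1, Nat.add_sub_cancel, List.singleton_append]

-- getD on a mapped range
lemma getD_map_range' (f : Nat → Int) (N i : Nat) (h : i < N) :
    ((List.range N).map f).getD i 0 = f i := by
  rw [List.getD_eq_getElem _ _ (by simpa using h)]
  simp

-- set on a mapped range
lemma set_map_range (f : Nat → Int) (N i : Nat) (v : Int) :
    ((List.range N).map f).set i v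
      = (List.range N).map (fun j => if j = i then v else f j) := by
  apply List.ext_getElem
  · simp
  · intro j h1 h2
    simp only [List.length_set, List.length_map, List.length_range] at h1
    rw [List.getElem_set]
    simp only [List.getElem_map, List.getElem_range]
    by_cases hij : i = j
    · subst hij; simp
    · rw [if_neg hij, if_neg (by omega)]

-- one inner sweep processed up to index t
lemma inner_inv (N k t : Nat) (hN : 1 ≤ N) (ht : t ≤ N - 1) :
    (List.range t).foldl (pvUpd (pvRow k N)) (pvRow k N)
      = (List.range N).map (fun j => if j ≤ t then pvG (k + 1) j else pvG k j) := by
  induction t with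
  | zero =>
      simp only [List.range_zero, List.foldl_nil, pvRow]
      apply List.map_congr_left
      intro j hj
      rcases Nat.eq_zero_or_pos j with rfl | hjp
      · simp [pvG]
      · simp [Nat.not_le.mpr hjp]
  | succ t ih =>
      have ht' : t ≤ N - 1 := by omega
      have htN : t + 1 < N := by omega
      rw [List.range_succ, List.foldl_append, ih ht', List.foldl_cons, List.foldl_nil]
      have hmt : (pvRow k N).getD t 0 = pvG k t := by
        simpa [pvRow] using getD_map_range' (pvG k) N t (by omega)
      have hlt : ((List.range N).map (fun j => if j ≤ t then pvG (k + 1) j else pvG k j)).getD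
          (t + 1) 0 = pvG k (t + 1) := by
        rw [getD_map_range' _ N (t + 1) htN]
        simp
      have hnext : pvG (k + 1) (t + 1)
          = (((Nat.choose k t + Nat.choose k (t + 1)) % 2 : Nat) : Int) := by
        simp [pvG, Nat.choose_succ_succ]
      unfold pvUpd
      rw [hmt, hlt]
      have hset : ∀ v : Int, v = pvG (k + 1) (t + 1) →
          ((List.range N).map (fun j => if j ≤ t then pvG (k + 1) j else pvG k j)).set (t + 1) v
            = (List.range N).map (fun j => if j ≤ t + 1 then pvG (k + 1) j else pvG k j) := by
        intro v hv
        rw [set_map_range]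
        apply List.map_congr_left
        intro j hj
        split_ifs with h1 h2 h3 <;>
          first
          | rfl
          | omega
          | (subst h1; exact hv)
      have hprev : Nat.choose k t % 2 = 0 →
          (List.range N).map (fun j => if j ≤ t then pvG (k + 1) j else pvG k j)
            = (List.range N).map (fun j => if j ≤ t + 1 then pvG (k + 1) j else pvG k j) := by
        intro ha
        apply List.map_congr_left
        intro j hj
        split_ifs with h1 h2
        · rfl
        · exact absurd (by omega : j ≤ t + 1) h2
        · have hj1 : j = t + 1 := by omega
          subst hj1
          rw [hnext]
          unfold pvG
          congr 1
          omega
        · rfl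
      rcases Nat.mod_two_eq_zero_or_one (Nat.choose k t) with ha | ha
      · rw [if_neg (by simp [pvG, ha]), hprev ha]
      · rw [if_pos (by simp [pvG, ha])]
        rcases Nat.mod_two_eq_zero_or_one (Nat.choose k (t + 1)) with hb | hb
        · rw [if_neg (by simp [pvG, hb]), hset 1 (by
            rw [hnext, (by omega : (Nat.choose k t + Nat.choose k (t + 1)) % 2 = 1)]; simp)]
        · rw [if_pos (by simp [pvG, hb]), hset 0 (by
            rw [hnext, (by omega : (Nat.choose k t + Nat.choose k (t + 1)) % 2 = 0)]; simp)]

-- one full inner sweep turns row k into row k+1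
lemma inner_step (N k : Nat) (hN : 1 ≤ N) :
    (List.range (N - 1)).foldl (pvUpd (pvRow k N)) (pvRow k N) = pvRow (k + 1) N := by
  rw [inner_inv N k (N - 1) hN le_rfl]
  apply List.map_congr_left
  intro j hj
  simp only [List.mem_range] at hj
  simp [Nat.le_sub_one_of_lt hj]

-- the outer loop ignores its counter: c sweeps take row k to row k+c
lemma outer_fold (N : Nat) (hN : 1 ≤ N) (L : List Int) (k : Nat) :
    L.foldl (fun l (_ : Int) => (List.range (N - 1)).foldl (pvUpd l) l) (pvRow k N)
      = pvRow (k + L.length) N := by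
  induction L generalizing k with
  | nil => simp
  | cons x xs ih =>
      simp only [List.foldl_cons, inner_step N k hN, List.length_cons]
      rw [ih (k + 1)]
      ring_nf

-- list sum of a mapped range as a Finset sum
lemma sum_map_range (f : Nat → Int) (N : Nat) :
    ((List.range N).map f).sum = ∑ j ∈ Finset.range N, f j := by
  induction N with
  | zero => simp
  | succ N ih => rw [List.range_succ, List.map_append, List.sum_append,
      Finset.sum_range_succ, ih]; simp

-- splitting a sum over an even range by parity
lemma sum_range_two_mul (f : Nat → Nat) (q : Nat) :
    ∑ j ∈ Finset.range (2 * q), f j = ∑ i ∈ Finset.range q, (f (2 * i) + f (2 * i + 1)) := by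
  induction q with
  | zero => simp
  | succ q ih =>
      have h : 2 * (q + 1) = (2 * q + 1) + 1 := by ring
      rw [h, Finset.sum_range_succ, Finset.sum_range_succ, ih, Finset.sum_range_succ]
      ring

-- Lucas' theorem mod 2
lemma lucas2 (m j : Nat) :
    Nat.choose m j % 2 = (Nat.choose (m % 2) (j % 2) * Nat.choose (m / 2) (j / 2)) % 2 := by
  haveI : Fact (Nat.Prime 2) := ⟨Nat.prime_two⟩
  exact Choose.choose_modEq_choose_mod_mul_choose_div_nat (p := 2)

lemma lucas2_even (m i : Nat) : Nat.choose m (2 * i) % 2 = Nat.choose (m / 2) i % 2 := by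
  have := lucas2 m (2 * i)
  simpa [Nat.mul_mod_right, Nat.mul_div_cancel_left] using this

lemma lucas2_odd (m i : Nat) :
    Nat.choose m (2 * i + 1) % 2 = (m % 2 * Nat.choose (m / 2) i) % 2 := by
  have h := lucas2 m (2 * i + 1)
  have h1 : (2 * i + 1) % 2 = 1 := by omega
  have h2 : (2 * i + 1) / 2 = i := by omega
  simpa [h1, h2, Nat.choose_one_right] using h

lemma popcount_pos (m : Nat) (hm : 0 < m) : popcount m = m % 2 + popcount (m / 2) := by
  obtain ⟨j, rfl⟩ : ∃ j, m = j + 1 := ⟨m - 1, by omega⟩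
  rw [popcount]

-- the number of odd entries in row m of Pascal's triangle is 2^popcount(m)
lemma sum_row (m : Nat) :
    (∑ j ∈ Finset.range (m + 1), Nat.choose m j % 2) = 2 ^ popcount m := by
  induction m using Nat.strong_induction_on with
  | _ m ih =>
    rcases Nat.eq_zero_or_pos m with rfl | hm
    · simp [popcount]
    rcases Nat.mod_two_eq_zero_or_one m with hr | hr
    · -- m even, m = 2q with q ≥ 1; row sum = row sum of q
      have hq : 0 < m / 2 := by omega
      have hsplit : m + 1 = 2 * (m / 2) + 1 := by omega
      rw [hsplit, Finset.sum_range_succ, sum_range_two_mul]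
      have heven : ∀ i, Nat.choose m (2 * i) % 2 = Nat.choose (m / 2) i % 2 := lucas2_even m
      have hodd : ∀ i, Nat.choose m (2 * i + 1) % 2 = 0 := by
        intro i; rw [lucas2_odd, hr]; simp
      have htop : Nat.choose m (2 * (m / 2)) % 2 = 1 := by
        rw [lucas2_even m (m / 2), Nat.choose_self]
      calc (∑ i ∈ Finset.range (m / 2),
              (Nat.choose m (2 * i) % 2 + Nat.choose m (2 * i + 1) % 2))
            + Nat.choose m (2 * (m / 2)) % 2
          = (∑ i ∈ Finset.range (m / 2), Nat.choose (m / 2) i % 2) + 1 := by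
            rw [htop]
            congr 1
            exact Finset.sum_congr rfl fun i _ => by rw [heven, hodd, Nat.add_zero]
        _ = ∑ i ∈ Finset.range (m / 2 + 1), Nat.choose (m / 2) i % 2 := by
            rw [Finset.sum_range_succ, Nat.choose_self]
        _ = 2 ^ popcount (m / 2) := ih (m / 2) (by omega)
        _ = 2 ^ popcount m := by rw [popcount_pos m hm, hr, Nat.zero_add]
    · -- m odd, m = 2q+1; row sum = 2 * row sum of q
      have hsplit : m + 1 = 2 * (m / 2 + 1) := by omega
      rw [hsplit, sum_range_two_mul]
      have hstep : ∀ i, Nat.choose m (2 * i) % 2 + Nat.choose m (2 * i + 1) % 2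
          = 2 * (Nat.choose (m / 2) i % 2) := by
        intro i
        rw [lucas2_even, lucas2_odd, hr, one_mul, two_mul]
      calc ∑ i ∈ Finset.range (m / 2 + 1),
              (Nat.choose m (2 * i) % 2 + Nat.choose m (2 * i + 1) % 2)
          = ∑ i ∈ Finset.range (m / 2 + 1), 2 * (Nat.choose (m / 2) i % 2) := by
            exact Finset.sum_congr rfl fun i _ => hstep i
        _ = 2 * ∑ i ∈ Finset.range (m / 2 + 1), Nat.choose (m / 2) i % 2 := by
            rw [Finset.mul_sum]
        _ = 2 ^ popcount m := by
            rw [ih (m / 2) (by omega), popcount_pos m hm, hr, pow_add]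
            ring

-- the inner Python body at a nonnegative Int index equals pvUpd
lemma body_eq (m l : List Int) (j : Nat) :
    (if PySem.List.pyGetD m (0 + (j : Int)) 0 == 1 then
        (if PySem.List.pyGetD l (0 + (j : Int) + 1) 0 == 1 then
          PySem.List.pySetD l (0 + (j : Int) + 1) 0
        else PySem.List.pySetD l (0 + (j : Int) + 1) 1)
      else l) = pvUpd m l j := by
  have h1 : (0 + (j : Int)) = ((j : Nat) : Int) := by ring
  rw [h1]
  have h2 : ((j : Int) + 1) = (((j + 1 : Nat)) : Int) := (Nat.cast_add_one j).symm
  simp only [h2, PySem.List.pyGetD_natCast, PySem.List.pySetD_natCast, pvUpd]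

lemma amp_eq_closed (n : Int) : amp n = amp_alt n := by
  by_cases hn : n ≤ 0
  · show ((PySem.List.pyRange 1 n 1).foldl _ ((PySem.List.pyRange 1 n 1).foldl _ [1])).sum
        = amp_alt n
    rw [PySem.List.pyRange_one_eq_nil (by omega : n ≤ 1)]
    simp [amp_alt, hn]
  · rw [Int.not_le] at hn
    have hN : 1 ≤ n.toNat := by omega
    have hnN : n = (n.toNat : Int) := by omega
    show ((PySem.List.pyRange 1 n 1).foldl
        (fun l (_k : Int) => (PySem.List.pyRange 0 (n - 1) 1).foldl
          (fun l' (j : Int) =>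
            if PySem.List.pyGetD l j 0 == 1 then
              (if PySem.List.pyGetD l' (j + 1) 0 == 1 then PySem.List.pySetD l' (j + 1) 0
               else PySem.List.pySetD l' (j + 1) 1)
            else l') l)
        ((PySem.List.pyRange 1 n 1).foldl (fun l (_i : Int) => l ++ [0]) [1])).sum
      = amp_alt n
    rw [amp_init, PySem.List.length_pyRange_one]
    have hinit : ([1] ++ List.replicate (n - 1).toNat 0 : List Int) = pvRow 0 n.toNat := by
      rw [pvRow_zero n.toNat hN]
      congr 2
      omega
    rw [hinit]
    have hbody : (fun (l : List Int) (_k : Int) => (PySem.List.pyRange 0 (n - 1) 1).foldl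
          (fun l' (j : Int) =>
            if PySem.List.pyGetD l j 0 == 1 then
              (if PySem.List.pyGetD l' (j + 1) 0 == 1 then PySem.List.pySetD l' (j + 1) 0
               else PySem.List.pySetD l' (j + 1) 1)
            else l') l)
        = (fun (l : List Int) (_k : Int) =>
            (List.range (n.toNat - 1)).foldl (pvUpd l) l) := by
      funext l k
      rw [PySem.List.pyRange_one, show ((n - 1) - 0).toNat = n.toNat - 1 by omega,
        List.foldl_map]
      have hfn : (fun (l' : List Int) (j : Nat) =>
          if PySem.List.pyGetD l (0 + (j : Int)) 0 == 1 then
            (if PySem.List.pyGetD l' (0 + (j : Int) + 1) 0 == 1 then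
              PySem.List.pySetD l' (0 + (j : Int) + 1) 0
             else PySem.List.pySetD l' (0 + (j : Int) + 1) 1)
          else l') = pvUpd l := by
        funext l' j
        exact body_eq l l' j
      rw [hfn]
    rw [hbody, outer_fold n.toNat hN _ 0, PySem.List.length_pyRange_one, Nat.zero_add]
    obtain ⟨M, hM⟩ : ∃ M, n.toNat = M + 1 := ⟨n.toNat - 1, by omega⟩
    have hM' : (n - 1).toNat = M := by omega
    rw [show (n - 1).toNat = n.toNat - 1 by omega, hM, Nat.add_sub_cancel]
    unfold pvRow pvG
    rw [sum_map_range, ← Nat.cast_sum, sum_row M]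
    rw [amp_alt, if_neg (by omega), hM']
    push_cast
    ring

-- ===== VERDICT (by name: the statement is the Claim_ definition above) =====
theorem amp_spec : Claim_equal_amp := by
  intro n _
  show amp n = amp_alt n
  exact amp_eq_closed n
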